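-- pv_equiv track=rewrite | github.com/andmarek/advent-of-code-2024 | src/day4/sol.py | search_diagonal_left
-- ===== SOURCE A (Python) =====
-- XMAS = "xmas"
--
-- SAMX = XMAS[::-1]
--
-- def search_horizontal(lines) -> int:
--     count = 0
--     for line in lines:
--         for i in range(len(line) - len(XMAS) + 1):
--             window = line[i : i + len(XMAS)]
--             if window == XMAS or window == SAMX:
--                 count += 1
--     return count
--
-- def search_diagonal_left(lines) -> int:
--     rows, cols = len(lines), len(lines[0])
--     count = 0
--     for c in range(cols):
--         diag = ""
--         r, col = 0, c
--         while r < rows and col >= 0: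
--             diag += lines[r][col]
--             r += 1
--             col -= 1
--         count += search_horizontal([diag])
--
--     for r in range(1, rows):
--         diag = ""
--         row, c = r, cols - 1
--         while row < rows and c >= 0:
--             diag += lines[row][c]
--             row += 1
--             c -= 1
--         count += search_horizontal([diag])
--     return count
-- ===== SOURCE B (Python) =====
-- XMAS = "xmas"
-- SAMX = XMAS[::-1]
--
-- def search_diagonal_left(lines) -> int:
--     rows, cols = len(lines), len(lines[0])
--     count = 0
--     for r in range(rows):
--         for c in range(cols):
--             if r + 3 < rows and c - 3 >= 0:
--                 window = lines[r][c] + lines[r + 1][c - 1] + lines[r + 2][c - 2] + lines[r + 3][c - 3]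
--                 if window == XMAS or window == SAMX:
--                     count += 1
--     return count
-- ===== Notes on version B (the rewrite author's own statement) =====
-- stated objective: simpler
-- what changed: B drops the search_horizontal helper and the per-anti-diagonal string building entirely: it scans every grid cell once and tests the single length-4 down-left window starting there, which covers each diagonal window exactly once.
import Mathlib
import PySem

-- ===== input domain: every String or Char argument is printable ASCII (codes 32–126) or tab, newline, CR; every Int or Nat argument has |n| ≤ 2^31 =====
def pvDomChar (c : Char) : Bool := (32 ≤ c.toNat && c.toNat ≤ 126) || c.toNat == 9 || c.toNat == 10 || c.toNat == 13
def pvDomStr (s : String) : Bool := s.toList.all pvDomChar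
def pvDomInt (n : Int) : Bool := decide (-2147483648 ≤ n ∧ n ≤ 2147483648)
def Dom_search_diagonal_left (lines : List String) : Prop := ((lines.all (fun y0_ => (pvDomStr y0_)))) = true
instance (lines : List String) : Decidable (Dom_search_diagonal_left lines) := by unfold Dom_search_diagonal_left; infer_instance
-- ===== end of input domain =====

-- B replaces A's build-each-anti-diagonal-string-then-scan decomposition by a direct per-start-cell
-- window test over the grid (objective: simpler; same asymptotic cost, no intermediate diagonal strings).

-- ===== PORT A =====
def pvXMAS : List Char := ['x', 'm', 'a', 's']                                   -- XMAS = "xmas"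
def pvSAMX : List Char := (PySem.List.slice? pvXMAS none none (-1)).getD []      -- SAMX = XMAS[::-1]

-- lines[r][col] (in-range on every admitted input; the .getD defaults are never reached inside Pre_)
def pvCharAt (lines : List String) (r col : Int) : Char :=
  (PySem.List.pyGet? ((PySem.List.pyGet? lines r).getD "").toList col).getD ' '

def search_horizontal (ls : List (List Char)) : Int :=
  ls.foldl (fun count line =>
    (PySem.List.pyRange 0 ((line.length : Int) - (pvXMAS.length : Int) + 1) 1).foldl
      (fun cnt i =>
        let window := PySem.List.slice line (some i) (some (i + (pvXMAS.length : Int)))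
        if window = pvXMAS ∨ window = pvSAMX then cnt + 1 else cnt)
      count) 0

-- the 'while r < rows and col >= 0: diag += lines[r][col]' loop
def pvDiagA (lines : List String) (rows r col : Int) (diag : List Char) : List Char :=
  if h : r < rows ∧ 0 ≤ col then
    pvDiagA lines rows (r + 1) (col - 1) (diag ++ [pvCharAt lines r col])
  else diag
termination_by (col + 1).toNat
decreasing_by omega

def search_diagonal_left (lines : List String) : Int :=
  let rows : Int := lines.length
  let cols : Int := ((PySem.List.pyGet? lines 0).getD "").toList.length
  let count : Int :=
    (PySem.List.pyRange 0 cols 1).foldl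
      (fun count c => count + search_horizontal [pvDiagA lines rows 0 c []]) 0
  (PySem.List.pyRange 1 rows 1).foldl
      (fun count r => count + search_horizontal [pvDiagA lines rows r (cols - 1) []]) count

-- ===== PORT B =====
def search_diagonal_left_alt (lines : List String) : Int :=
  let rows : Int := lines.length
  let cols : Int := ((PySem.List.pyGet? lines 0).getD "").toList.length
  (PySem.List.pyRange 0 rows 1).foldl (fun count r =>
    (PySem.List.pyRange 0 cols 1).foldl (fun cnt c =>
      if r + 3 < rows ∧ c - 3 ≥ 0 then
        let window := [pvCharAt lines r c, pvCharAt lines (r + 1) (c - 1),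
                       pvCharAt lines (r + 2) (c - 2), pvCharAt lines (r + 3) (c - 3)]
        if window = pvXMAS ∨ window = pvSAMX then cnt + 1 else cnt
      else cnt) count) 0

-- ===== PRECONDITION & SPEC =====
-- Pre_ excludes exactly the inputs on which the Python A raises: the empty list (lines[0] is an
-- IndexError) and ragged grids whose later lines are shorter than the first (lines[r][col] raises
-- while the diagonals are built).
def Pre_search_diagonal_left (lines : List String) : Prop :=
  lines ≠ [] ∧ ∀ s ∈ lines, (lines.headD "").toList.length ≤ s.toList.length
instance (lines : List String) : Decidable (Pre_search_diagonal_left lines) := by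
  unfold Pre_search_diagonal_left; infer_instance
def pvWitness_search_diagonal_left : List String := ["xmas", "maqm", "asqa", "sqas"]

def Spec_search_diagonal_left (lines : List String) (out : Int) : Prop := out = search_diagonal_left_alt lines
instance (lines : List String) (out : Int) : Decidable (Spec_search_diagonal_left lines out) := by unfold Spec_search_diagonal_left; infer_instance

-- ===== CLAIM (what is proved, stated in full; the proofs are below) =====
def Claim_equal_search_diagonal_left : Prop := ∀ (lines : List String), Dom_search_diagonal_left lines → Pre_search_diagonal_left lines → Spec_search_diagonal_left lines (search_diagonal_left lines)

-- ===== LEMMAS AND PROOFS =====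

-- indicator of a window match at start cell (r, c), Nat coordinates
def pvG (lines : List String) (r c : Nat) : Int :=
  if (r : Int) + 3 < (lines.length : Int) ∧ 3 ≤ c ∧
      ([pvCharAt lines r c, pvCharAt lines ((r : Int) + 1) ((c : Int) - 1),
        pvCharAt lines ((r : Int) + 2) ((c : Int) - 2),
        pvCharAt lines ((r : Int) + 3) ((c : Int) - 3)] = pvXMAS ∨
       [pvCharAt lines r c, pvCharAt lines ((r : Int) + 1) ((c : Int) - 1),
        pvCharAt lines ((r : Int) + 2) ((c : Int) - 2),
        pvCharAt lines ((r : Int) + 3) ((c : Int) - 3)] = pvSAMX)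
  then 1 else 0
lemma pvDiagA_eq (lines : List String) (rows : Int) :
    ∀ (r col : Int) (acc : List Char),
      pvDiagA lines rows r col acc =
        acc ++ (List.range (min (rows - r) (col + 1)).toNat).map
          (fun k : Nat => pvCharAt lines (r + (k : Int)) (col - (k : Int))) := by
  intro r col acc
  induction r, col, acc using pvDiagA.induct lines rows with
  | case1 r col acc h ih =>
    rw [pvDiagA, dif_pos h, ih]
    have hL : (min (rows - r) (col + 1)).toNat = (min (rows - (r+1)) ((col-1) + 1)).toNat + 1 := by omega
    rw [hL, List.range_succ_eq_map, List.map_cons, List.map_map]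
    have hmap : (List.range ((min (rows - (r+1)) ((col-1)+1)).toNat)).map
        (fun k : Nat => pvCharAt lines (r + 1 + (k:Int)) (col - 1 - (k:Int))) =
        (List.range ((min (rows - (r+1)) ((col-1)+1)).toNat)).map
        ((fun k : Nat => pvCharAt lines (r + (k:Int)) (col - (k:Int))) ∘ Nat.succ) := by
      apply List.map_congr_left
      intro a _
      simp only [Function.comp_apply]
      congr 1 <;> push_cast <;> ring
    rw [← hmap]
    simp
  | case2 r col acc h =>
    rw [pvDiagA, dif_neg h]
    have : (min (rows - r) (col + 1)).toNat = 0 := by omega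
    simp [this]

lemma pvSumRange (n : Nat) (f : Nat → Int) :
    ((List.range n).map f).sum = ∑ i ∈ Finset.range n, f i := by
  induction n with
  | zero => simp
  | succ m ih => rw [List.range_succ, Finset.sum_range_succ, List.map_append, List.sum_append, ih]; simp

lemma pvSH_single (l : List Char) :
    search_horizontal [l] =
      ∑ i ∈ Finset.range (l.length - 3),
        (if (l.drop i).take 4 = pvXMAS ∨ (l.drop i).take 4 = pvSAMX then (1 : Int) else 0) := by
  have hlen : ((l.length : Int) - (pvXMAS.length : Int) + 1) = (l.length : Int) - 3 := by
    simp [pvXMAS]; ring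
  have hrange : PySem.List.pyRange 0 ((l.length : Int) - 3) 1 =
      (List.range (l.length - 3)).map (fun k : Nat => (k : Int)) := by
    rw [PySem.List.pyRange_one]
    have h0 : (((l.length : Int) - 3) - 0).toNat = l.length - 3 := by omega
    rw [h0]
    exact List.map_congr_left (fun k _ => by simp)
  unfold search_horizontal
  rw [List.foldl_cons, List.foldl_nil, hlen, hrange]
  rw [List.foldl_map, PySem.List.foldl_ite_add_one
    (p := fun k : Nat => PySem.List.slice l (some (k:Int)) (some ((k:Int) + (pvXMAS.length : Int))) = pvXMAS ∨
      PySem.List.slice l (some (k:Int)) (some ((k:Int) + (pvXMAS.length : Int))) = pvSAMX)]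
  rw [zero_add]
  rw [← PySem.List.sum_map_ite_one_zero, pvSumRange]
  apply Finset.sum_congr rfl
  intro i hi
  have h4 : ((pvXMAS.length : Int)) = ((4:Nat) : Int) := by simp [pvXMAS]
  rw [h4, PySem.List.slice_natCast_add]
  simp

lemma pvWindow (L i : Nat) (f : Nat → Char) (h : i + 4 ≤ L) :
    (((List.range L).map f).drop i).take 4 = [f i, f (i + 1), f (i + 2), f (i + 3)] := by
  rw [← List.map_drop, List.range_eq_range', List.drop_range', ← List.map_take,
      List.take_range'_of_length_ge (by omega)]
  simp [List.range'_succ]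

lemma pvDiagCount (lines : List String) (r0 c0 : Nat) :
    search_horizontal [pvDiagA lines (lines.length : Int) (r0 : Int) (c0 : Int) []] =
      ∑ k ∈ Finset.range (min (lines.length - r0) (c0 + 1)), pvG lines (r0 + k) (c0 - k) := by
  set R := lines.length with hR
  set L := min (R - r0) (c0 + 1) with hLdef
  have hLt : (min ((R : Int) - (r0 : Int)) ((c0 : Int) + 1)).toNat = L := by omega
  rw [pvDiagA_eq, hLt, List.nil_append, pvSH_single]
  simp only [List.length_map, List.length_range]
  have hsub : Finset.range (L - 3) ⊆ Finset.range L := by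
    intro x hx; simp only [Finset.mem_range] at hx ⊢; omega
  have hzero : ∀ k ∈ Finset.range L, k ∉ Finset.range (L - 3) → pvG lines (r0 + k) (c0 - k) = 0 := by
    intro k hk hk'
    simp only [Finset.mem_range] at hk hk'
    have hguard : ¬ (((r0 + k : Nat) : Int) + 3 < (R : Int) ∧ 3 ≤ c0 - k) := by omega
    simp only [pvG]
    rw [if_neg]
    intro hcon
    exact hguard ⟨hcon.1, hcon.2.1⟩
  rw [← Finset.sum_subset hsub hzero]
  apply Finset.sum_congr rfl
  intro i hi
  simp only [Finset.mem_range] at hi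
  rw [pvWindow L i _ (by omega)]
  have hg1 : ((r0 + i : Nat) : Int) + 3 < (R : Int) := by omega
  have hg2 : 3 ≤ c0 - i := by omega
  have hw : ([pvCharAt lines ((r0 + i : Nat) : Int) ((c0 - i : Nat) : Int),
              pvCharAt lines (((r0 + i : Nat) : Int) + 1) (((c0 - i : Nat) : Int) - 1),
              pvCharAt lines (((r0 + i : Nat) : Int) + 2) (((c0 - i : Nat) : Int) - 2),
              pvCharAt lines (((r0 + i : Nat) : Int) + 3) (((c0 - i : Nat) : Int) - 3)]
           : List Char) =
      [pvCharAt lines ((r0 : Int) + (i : Int)) ((c0 : Int) - (i : Int)),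
       pvCharAt lines ((r0 : Int) + ((i+1 : Nat) : Int)) ((c0 : Int) - ((i+1 : Nat) : Int)),
       pvCharAt lines ((r0 : Int) + ((i+2 : Nat) : Int)) ((c0 : Int) - ((i+2 : Nat) : Int)),
       pvCharAt lines ((r0 : Int) + ((i+3 : Nat) : Int)) ((c0 : Int) - ((i+3 : Nat) : Int))] := by
    push_cast [Nat.cast_sub (by omega : i ≤ c0)]
    ring_nf
  simp only [pvG, hw]
  split_ifs <;> tauto

lemma pvFiber1 (g : Nat → Nat → Int) (R C s : Nat) (hs : s < C) :
    ∑ k ∈ Finset.range (min R (s + 1)), g k (s - k) =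
      ∑ p ∈ (Finset.range R ×ˢ Finset.range C).filter (fun p => p.1 + p.2 = s), g p.1 p.2 := by
  refine Finset.sum_nbij' (fun k => (k, s - k)) (fun p => p.1) ?_ ?_ ?_ ?_ ?_
  · intro k hk
    simp only [Finset.mem_range, Finset.mem_filter, Finset.mem_product] at hk ⊢
    omega
  · intro p hp
    simp only [Finset.mem_range, Finset.mem_filter, Finset.mem_product] at hp ⊢
    omega
  · intro k hk; rfl
  · intro p hp
    simp only [Finset.mem_range, Finset.mem_filter, Finset.mem_product] at hp
    ext <;> simp <;> omega
  · intro k hk; rfl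

lemma pvFiber2 (g : Nat → Nat → Int) (R C r0 : Nat) (hr : 1 ≤ r0) :
    ∑ k ∈ Finset.range (min (R - r0) C), g (r0 + k) (C - 1 - k) =
      ∑ p ∈ (Finset.range R ×ˢ Finset.range C).filter (fun p => p.1 + p.2 = r0 + C - 1), g p.1 p.2 := by
  refine Finset.sum_nbij' (fun k => (r0 + k, C - 1 - k)) (fun p => p.1 - r0) ?_ ?_ ?_ ?_ ?_
  · intro k hk
    simp only [Finset.mem_range, Finset.mem_filter, Finset.mem_product] at hk ⊢
    omega
  · intro p hp
    simp only [Finset.mem_range, Finset.mem_filter, Finset.mem_product] at hp ⊢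
    omega
  · intro k hk; simp
  · intro p hp
    simp only [Finset.mem_range, Finset.mem_filter, Finset.mem_product] at hp
    ext <;> simp <;> omega
  · intro k hk; rfl

lemma pvDecomp (g : Nat → Nat → Int) (R C : Nat) (hR : 1 ≤ R) :
    (∑ c ∈ Finset.range C, ∑ k ∈ Finset.range (min R (c + 1)), g k (c - k)) +
      (∑ t ∈ Finset.range (R - 1), ∑ k ∈ Finset.range (min (R - (t + 1)) C), g (t + 1 + k) (C - 1 - k)) =
    ∑ r ∈ Finset.range R, ∑ c ∈ Finset.range C, g r c := by
  have hgrid : ∑ r ∈ Finset.range R, ∑ c ∈ Finset.range C, g r c =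
      ∑ p ∈ Finset.range R ×ˢ Finset.range C, g p.1 p.2 := by
    rw [Finset.sum_product]
  have hfib : ∀ p ∈ Finset.range R ×ˢ Finset.range C, p.1 + p.2 ∈ Finset.range (R + C - 1) := by
    intro p hp
    simp only [Finset.mem_range, Finset.mem_product] at hp ⊢
    omega
  rw [hgrid, ← Finset.sum_fiberwise_of_maps_to hfib]
  have hsplit : Finset.range (R + C - 1) = Finset.range C ∪ Finset.Ico C (R + C - 1) := by
    rw [Finset.range_eq_Ico, Finset.Ico_union_Ico_eq_Ico (by omega) (by omega)]
  rw [hsplit, Finset.sum_union (by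
      rw [Finset.range_eq_Ico]
      exact Finset.Ico_disjoint_Ico_consecutive 0 C (R + C - 1))]
  congr 1
  · apply Finset.sum_congr rfl
    intro s hs
    simp only [Finset.mem_range] at hs
    exact pvFiber1 g R C s hs
  · rw [Finset.sum_Ico_eq_sum_range]
    have hRC : R + C - 1 - C = R - 1 := by omega
    rw [hRC]
    apply Finset.sum_congr rfl
    intro t ht
    rw [pvFiber2 g R C (t + 1) (by omega)]
    have : t + 1 + C - 1 = C + t := by omega
    rw [this]

lemma pvA_eq (lines : List String) :
    search_diagonal_left lines =
      (∑ c ∈ Finset.range ((PySem.List.pyGet? lines 0).getD "").toList.length,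
        ∑ k ∈ Finset.range (min lines.length (c + 1)), pvG lines k (c - k)) +
      (∑ t ∈ Finset.range (lines.length - 1),
        ∑ k ∈ Finset.range (min (lines.length - (t + 1)) ((PySem.List.pyGet? lines 0).getD "").toList.length),
          pvG lines (t + 1 + k) (((PySem.List.pyGet? lines 0).getD "").toList.length - 1 - k)) := by
  simp only [search_diagonal_left]
  set R := lines.length with hR
  set C := ((PySem.List.pyGet? lines 0).getD "").toList.length with hC
  rw [PySem.List.foldl_add, PySem.List.foldl_add]
  rw [PySem.List.pyRange_one 0 (C : Int), PySem.List.pyRange_one 1 (R : Int)]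
  have hc0 : (((C : Int)) - 0).toNat = C := by omega
  have hr1 : (((R : Int)) - 1).toNat = R - 1 := by omega
  rw [hc0, hr1, List.map_map, List.map_map]
  simp only [Function.comp_def, zero_add]
  rw [pvSumRange, pvSumRange]
  congr 1
  · apply Finset.sum_congr rfl
    intro c _
    rw [show (0 : Int) = ((0 : Nat) : Int) by simp, pvDiagCount lines 0 c]
    simp [← hR]
  · apply Finset.sum_congr rfl
    intro t _
    by_cases hC0 : C = 0
    · have hneg : (C : Int) - 1 = -1 := by omega
      rw [hneg, pvDiagA, dif_neg (by omega)]
      rw [show search_horizontal [[]] = 0 from by decide, hC0]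
      simp
    · have h1 : (1 : Int) + (t : Int) = (((t + 1 : Nat)) : Int) := by push_cast; ring
      have h2 : (C : Int) - 1 = (((C - 1 : Nat)) : Int) := by omega
      rw [h1, h2, pvDiagCount lines (t + 1) (C - 1)]
      have h3 : C - 1 + 1 = C := by omega
      rw [h3]

lemma pvB_eq (lines : List String) :
    search_diagonal_left_alt lines =
      ∑ r ∈ Finset.range lines.length,
        ∑ c ∈ Finset.range ((PySem.List.pyGet? lines 0).getD "").toList.length, pvG lines r c := by
  simp only [search_diagonal_left_alt]
  set R := lines.length with hR
  set C := ((PySem.List.pyGet? lines 0).getD "").toList.length with hC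
  have hinner : ∀ (cl : List Nat) (count : Int) (r : Int),
      cl.foldl (fun cnt (c : Nat) =>
        if r + 3 < (R : Int) ∧ (c : Int) - 3 ≥ 0 then
          if [pvCharAt lines r c, pvCharAt lines (r + 1) ((c : Int) - 1),
              pvCharAt lines (r + 2) ((c : Int) - 2), pvCharAt lines (r + 3) ((c : Int) - 3)] = pvXMAS ∨
             [pvCharAt lines r c, pvCharAt lines (r + 1) ((c : Int) - 1),
              pvCharAt lines (r + 2) ((c : Int) - 2), pvCharAt lines (r + 3) ((c : Int) - 3)] = pvSAMX
          then cnt + 1 else cnt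
        else cnt) count
      = count + (cl.map (fun c : Nat =>
          if (r + 3 < (R : Int) ∧ (c : Int) - 3 ≥ 0) ∧
            ([pvCharAt lines r c, pvCharAt lines (r + 1) ((c : Int) - 1),
              pvCharAt lines (r + 2) ((c : Int) - 2), pvCharAt lines (r + 3) ((c : Int) - 3)] = pvXMAS ∨
             [pvCharAt lines r c, pvCharAt lines (r + 1) ((c : Int) - 1),
              pvCharAt lines (r + 2) ((c : Int) - 2), pvCharAt lines (r + 3) ((c : Int) - 3)] = pvSAMX)
          then (1 : Int) else 0)).sum := by
    intro cl
    induction cl with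
    | nil => intro count r; simp
    | cons c cs ih =>
      intro count r
      rw [List.foldl_cons, ih, List.map_cons, List.sum_cons]
      have hhead : ∀ (x : Int) (P Q : Prop) (_ : Decidable P) (_ : Decidable Q),
          (if P then if Q then x + 1 else x else x) = x + (if P ∧ Q then (1 : Int) else 0) := by
        intro x P Q _ _
        rw [ite_and]
        split_ifs <;> ring
      rw [hhead]
      ring
  have houter : ∀ (rl : List Nat) (count : Int),
      rl.foldl (fun count (k : Nat) =>
        (PySem.List.pyRange 0 (C : Int) 1).foldl (fun cnt c =>
          if (k : Int) + 3 < (R : Int) ∧ c - 3 ≥ 0 then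
            if [pvCharAt lines k c, pvCharAt lines ((k : Int) + 1) (c - 1),
                pvCharAt lines ((k : Int) + 2) (c - 2), pvCharAt lines ((k : Int) + 3) (c - 3)] = pvXMAS ∨
               [pvCharAt lines k c, pvCharAt lines ((k : Int) + 1) (c - 1),
                pvCharAt lines ((k : Int) + 2) (c - 2), pvCharAt lines ((k : Int) + 3) (c - 3)] = pvSAMX
            then cnt + 1 else cnt
          else cnt) count) count
      = count + (rl.map (fun k : Nat => ∑ c ∈ Finset.range C, pvG lines k c)).sum := by
    intro rl
    induction rl with
    | nil => intro count; simp
    | cons k ks ih =>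
      intro count
      rw [List.foldl_cons, ih, List.map_cons, List.sum_cons]
      have hmid : (PySem.List.pyRange 0 (C : Int) 1).foldl (fun cnt c =>
          if (k : Int) + 3 < (R : Int) ∧ c - 3 ≥ 0 then
            if [pvCharAt lines k c, pvCharAt lines ((k : Int) + 1) (c - 1),
                pvCharAt lines ((k : Int) + 2) (c - 2), pvCharAt lines ((k : Int) + 3) (c - 3)] = pvXMAS ∨
               [pvCharAt lines k c, pvCharAt lines ((k : Int) + 1) (c - 1),
                pvCharAt lines ((k : Int) + 2) (c - 2), pvCharAt lines ((k : Int) + 3) (c - 3)] = pvSAMX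
            then cnt + 1 else cnt
          else cnt) count = count + ∑ c ∈ Finset.range C, pvG lines k c := by
        rw [PySem.List.pyRange_one 0 (C : Int)]
        have h0 : (((C : Int)) - 0).toNat = C := by omega
        rw [h0, List.foldl_map]
        simp only [zero_add]
        rw [hinner (List.range C) count (k : Int), ← pvSumRange]
        congr 1
        congr 1
        apply List.map_congr_left
        intro c _
        simp only [pvG]
        split_ifs with h1 h2 h2 <;>
          first
            | rfl
            | (exact absurd ⟨h1.1.1, by have := h1.1.2; omega, h1.2⟩ h2)
            | (exact absurd ⟨⟨h2.1, by have := h2.2.1; omega⟩, h2.2.2⟩ h1)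
      rw [hmid]
      ring
  rw [PySem.List.pyRange_one 0 (R : Int)]
  have h0 : (((R : Int)) - 0).toNat = R := by omega
  rw [h0, List.foldl_map]
  simp only [zero_add]
  rw [houter (List.range R) 0, pvSumRange, zero_add]

-- ===== VERDICT (by name: the statement is the Claim_ definition above) =====
theorem search_diagonal_left_spec : Claim_equal_search_diagonal_left := by
  intro lines _ _
  unfold Spec_search_diagonal_left
  rcases Nat.eq_zero_or_pos lines.length with h0 | hR
  · rw [List.length_eq_zero_iff] at h0; subst h0; decide
  · rw [pvA_eq, pvB_eq, pvDecomp _ _ _ hR]
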